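-- pv_equiv track=rewrite | github.com/DainDwarf/AdventOfCode | 2017/Day9/day9.py | yellScores
-- ===== SOURCE A (Python) =====
-- def yellScores(stream):
--     """Yields scores from a cleaned_up stream."""
--     current_nest=0
--     for i in stream:
--         if i == '{':
--             current_nest += 1
--             yield current_nest
--         elif i == '}':
--             current_nest -= 1 #But do not yield.
-- ===== SOURCE B (Python) =====
-- from bisect import bisect_left
--
-- def yellScores(stream):
--     """Yields scores from a cleaned_up stream.
--
--     Index-based: collect the positions of '}' and '{'; the k-th '{' (0-based),
--     at position p, has depth (k+1) minus the number of '}' before p, found by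
--     binary search on the sorted close-position list."""
--     closes = [i for i, c in enumerate(stream) if c == '}']
--     opens = [i for i, c in enumerate(stream) if c == '{']
--     for k, p in enumerate(opens):
--         yield (k + 1) - bisect_left(closes, p)
-- ===== Notes on version B (the rewrite author's own statement) =====
-- stated objective: alternative
-- what changed: Replaces the running-counter loop with an index-based method: build the sorted position lists of '}' and '{', then compute each '{' score as its 1-based rank minus the number of earlier '}' found by bisect_left; no nesting state is carried.
import Mathlib
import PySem

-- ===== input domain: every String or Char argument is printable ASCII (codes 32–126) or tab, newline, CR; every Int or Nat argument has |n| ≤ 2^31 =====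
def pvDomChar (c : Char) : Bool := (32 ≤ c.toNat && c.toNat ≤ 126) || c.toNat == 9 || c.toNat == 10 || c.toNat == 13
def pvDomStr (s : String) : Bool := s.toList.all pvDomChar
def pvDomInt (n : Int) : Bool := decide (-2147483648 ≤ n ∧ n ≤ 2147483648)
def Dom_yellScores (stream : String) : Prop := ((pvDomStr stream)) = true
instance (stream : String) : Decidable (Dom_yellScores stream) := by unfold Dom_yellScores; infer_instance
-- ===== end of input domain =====

-- B drops A's running nesting counter: it builds the brace position indexes and scores each '{'
-- by rank arithmetic plus a binary search over the '}' positions (alternative algorithm, same-order cost).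

-- ===== PORT A =====
-- A: one loop carrying current_nest, appending current_nest after each '{'.
def yellScores (stream : String) : List Int :=
  (stream.toList.foldl
    (fun (st : Int × List Int) i =>
      if i = '{' then (st.1 + 1, st.2 ++ [st.1 + 1])
      else if i = '}' then (st.1 - 1, st.2)
      else st)
    (0, [])).2

-- ===== PORT B =====
-- bisect.bisect_left (a stdlib call), ported by its contract on a sorted list:
-- the insertion point = number of elements < x (exact here: closes is strictly increasing).
def bisectLeft (l : List Int) (x : Int) : Int := ((l.takeWhile (· < x)).length : Int)

-- B: position lists of '}' and '{'; the k-th '{' at position p scores (k+1) - bisect_left(closes, p).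
def yellScores_alt (stream : String) : List Int :=
  let cs := stream.toList
  let closes := (PySem.List.enumerate cs 0).filterMap (fun q => if q.2 = '}' then some q.1 else none)
  let opens := (PySem.List.enumerate cs 0).filterMap (fun q => if q.2 = '{' then some q.1 else none)
  (PySem.List.enumerate opens 0).map (fun q => (q.1 + 1) - bisectLeft closes q.2)

-- ===== PRECONDITION & SPEC =====
def Spec_yellScores (stream : String) (out : List Int) : Prop := out = yellScores_alt stream
instance (stream : String) (out : List Int) : Decidable (Spec_yellScores stream out) := by unfold Spec_yellScores; infer_instance

-- ===== CLAIM (what is proved, stated in full; the proofs are below) =====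
def Claim_equal_yellScores : Prop := ∀ (stream : String), Dom_yellScores stream → Spec_yellScores stream (yellScores stream)

-- ===== LEMMAS AND PROOFS =====

-- Reference recursion: A's loop written structurally (current_nest = n).
def scoresFrom : List Char → Int → List Int
  | [], _ => []
  | c :: cs, n =>
      if c = '{' then (n + 1) :: scoresFrom cs (n + 1)
      else if c = '}' then scoresFrom cs (n - 1)
      else scoresFrom cs n

theorem yellScores_loop_eq (cs : List Char) (n : Int) (acc : List Int) :
    (cs.foldl
      (fun (st : Int × List Int) i =>
        if i = '{' then (st.1 + 1, st.2 ++ [st.1 + 1])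
        else if i = '}' then (st.1 - 1, st.2)
        else st)
      (n, acc)).2 = acc ++ scoresFrom cs n := by
  induction cs generalizing n acc with
  | nil => simp [scoresFrom]
  | cons c cs ih =>
      by_cases h1 : c = '{'
      · simp [h1, scoresFrom, ih]
      · by_cases h2 : c = '}'
        · simp [h2, scoresFrom, ih]
        · simp [h1, h2, scoresFrom, ih]

-- one step of the position-list comprehensions.
theorem filterMap_enum_cons (c : Char) (cs : List Char) (s : Int) (ch : Char) :
    (PySem.List.enumerate (c :: cs) s).filterMap
        (fun q => if q.2 = ch then some q.1 else none)
      = (if c = ch then [s] else []) ++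
        (PySem.List.enumerate cs (s + 1)).filterMap
          (fun q => if q.2 = ch then some q.1 else none) := by
  rw [PySem.List.enumerate_cons]
  by_cases h : c = ch <;> simp [h]

-- takeWhile through a fully-satisfying prefix.
theorem takeWhile_append_all {α : Type} (p : α → Bool) (C D : List α)
    (h : ∀ x ∈ C, p x = true) :
    (C ++ D).takeWhile p = C ++ D.takeWhile p := by
  induction C with
  | nil => simp
  | cons a C ih =>
      have ha := h a (by simp)
      simp [ha, ih (fun x hx => h x (by simp [hx]))]

-- every index produced by enumerate cs s is ≥ s.
theorem mem_filterMap_enumerate_ge (cs : List Char) (s : Int) (ch : Char) :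
    ∀ x ∈ (PySem.List.enumerate cs s).filterMap
        (fun q => if q.2 = ch then some q.1 else none), s ≤ x := by
  intro x hx
  simp only [List.mem_filterMap] at hx
  obtain ⟨q, hq, hf⟩ := hx
  obtain ⟨k, hk, hq2⟩ := (PySem.List.mem_enumerate_iff _ _ _).1 hq
  subst hq2
  by_cases h : cs[k] = ch
  · simp only [h] at hf
    have : s + (k : Int) = x := by simpa using hf
    omega
  · simp [h] at hf

-- bisect_left of s over a split list: the part < s counts fully, the part ≥ s not at all.
theorem bisectLeft_split (C D : List Int) (s : Int)
    (hC : ∀ x ∈ C, x < s) (hD : ∀ y ∈ D, s ≤ y) :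
    bisectLeft (C ++ D) s = (C.length : Int) := by
  unfold bisectLeft
  rw [takeWhile_append_all _ C D (fun x hx => by simpa using hC x hx)]
  have hnil : D.takeWhile (fun a => decide (a < s)) = [] := by
    cases D with
    | nil => rfl
    | cons y ys =>
        have hy := hD y (by simp)
        rw [List.takeWhile_cons, if_neg (by simp only [decide_eq_true_eq]; omega)]
  rw [hnil]
  simp

-- Main bridge: with prior close positions C (all < s) and k opens already ranked,
-- the rank/bisect emission over the rest equals A's counter recursion at n = k - |C|.
theorem emit_eq_scoresFrom (cs : List Char) (s k : Int) (C : List Int)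
    (hC : ∀ x ∈ C, x < s) :
    (PySem.List.enumerate
        ((PySem.List.enumerate cs s).filterMap
          (fun q => if q.2 = '{' then some q.1 else none)) k).map
      (fun q => (q.1 + 1) -
        bisectLeft (C ++ (PySem.List.enumerate cs s).filterMap
          (fun q => if q.2 = '}' then some q.1 else none)) q.2)
    = scoresFrom cs (k - C.length) := by
  induction cs generalizing s k C with
  | nil => simp [PySem.List.enumerate_nil, scoresFrom]
  | cons c cs ih =>
      have hC' : ∀ x ∈ C, x < s + 1 := fun x hx => by have := hC x hx; omega
      by_cases h1 : c = '{'
      · subst h1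
        rw [filterMap_enum_cons _ _ _ '{', filterMap_enum_cons _ _ _ '}',
            if_pos (rfl : ('{' : Char) = '{'), if_neg (show ¬('{' : Char) = '}' from by decide)]
        simp only [List.singleton_append, List.nil_append]
        rw [PySem.List.enumerate_cons, List.map_cons]
        have hbl : bisectLeft
            (C ++ (PySem.List.enumerate cs (s + 1)).filterMap
              (fun q => if q.2 = '}' then some q.1 else none)) s = (C.length : Int) :=
          bisectLeft_split _ _ _ hC
            (fun y hy => le_trans (by omega) (mem_filterMap_enumerate_ge cs (s + 1) '}' y hy))
        rw [show scoresFrom ('{' :: cs) (k - (C.length : Int))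
              = (k - (C.length : Int) + 1) :: scoresFrom cs (k - (C.length : Int) + 1) from by
            simp [scoresFrom]]
        congr 1
        · rw [hbl]; ring
        · rw [ih (s + 1) (k + 1) C hC']
          congr 1
          ring
      · by_cases h2 : c = '}'
        · subst h2
          rw [filterMap_enum_cons _ _ _ '{', filterMap_enum_cons _ _ _ '}',
              if_neg (show ¬('}' : Char) = '{' from by decide), if_pos (rfl : ('}' : Char) = '}')]
          simp only [List.singleton_append, List.nil_append]
          rw [show C ++ s :: ((PySem.List.enumerate cs (s + 1)).filterMap
                (fun q => if q.2 = '}' then some q.1 else none))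
              = (C ++ [s]) ++ ((PySem.List.enumerate cs (s + 1)).filterMap
                (fun q => if q.2 = '}' then some q.1 else none)) from by simp]
          rw [ih (s + 1) k (C ++ [s]) (fun x hx => by
            rcases List.mem_append.1 hx with h | h
            · have := hC x h; omega
            · simp at h; omega)]
          rw [show scoresFrom ('}' :: cs) (k - (C.length : Int))
                = scoresFrom cs (k - (C.length : Int) - 1) from by simp [scoresFrom]]
          congr 1
          simp
          omega
        · rw [filterMap_enum_cons _ _ _ '{', filterMap_enum_cons _ _ _ '}',
              if_neg h1, if_neg h2]
          simp only [List.nil_append]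
          rw [ih (s + 1) k C hC']
          simp [scoresFrom, h1, h2]

-- ===== VERDICT (by name: the statement is the Claim_ definition above) =====
theorem yellScores_spec : Claim_equal_yellScores := by
  intro stream _
  unfold Spec_yellScores yellScores yellScores_alt
  rw [yellScores_loop_eq stream.toList 0 []]
  have h := emit_eq_scoresFrom stream.toList 0 0 [] (by simp)
  simp only [List.nil_append] at h
  simp [h]
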